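-- pv_equiv track=rewrite | github.com/xingtaodhu/zhongxing_python | utils.py | labels_sequence
-- ===== SOURCE A (Python) =====
-- def labels_sequence(labels, timestamps):
--     if labels == []:
--         return []
--     new_l = []
--     new_l.append(labels[0] + 1)
--     for i in range(1, len(timestamps)):
--         new_l += [0] * max(int(timestamps[i] - timestamps[i - 1] - 1), 0)
--         new_l.append(labels[i] + 1)
--     return new_l
-- ===== SOURCE B (Python) =====
-- def labels_sequence(labels, timestamps):
--     if labels == []:
--         return []
--     off = 0
--     pairs = [(0, labels[0] + 1)]
--     for i in range(1, len(timestamps)):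
--         off += max(int(timestamps[i] - timestamps[i - 1] - 1), 0) + 1
--         pairs.append((off, labels[i] + 1))
--     out = [0] * (off + 1)
--     for p, v in pairs:
--         out[p] = v
--     return out
-- ===== Notes on version B (the rewrite author's own statement) =====
-- stated objective: alternative
-- what changed: Instead of growing the output by repeated appends of zero-runs, B first computes each label's absolute position in one pass, then allocates a zero-filled list of the final length and scatters the labels into their recorded indices.
import Mathlib
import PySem

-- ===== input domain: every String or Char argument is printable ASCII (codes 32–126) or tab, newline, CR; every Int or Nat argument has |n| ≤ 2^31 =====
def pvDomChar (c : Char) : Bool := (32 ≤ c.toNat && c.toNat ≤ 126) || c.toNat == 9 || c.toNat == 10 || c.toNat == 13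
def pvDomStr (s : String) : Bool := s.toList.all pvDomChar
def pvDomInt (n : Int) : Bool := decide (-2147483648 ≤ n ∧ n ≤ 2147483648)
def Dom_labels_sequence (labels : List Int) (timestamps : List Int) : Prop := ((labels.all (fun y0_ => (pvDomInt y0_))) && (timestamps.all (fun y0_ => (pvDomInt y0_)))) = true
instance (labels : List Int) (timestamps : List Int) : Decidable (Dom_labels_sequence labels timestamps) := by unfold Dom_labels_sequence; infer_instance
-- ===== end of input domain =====

-- B computes each label's absolute position in a first pass, then scatters the labels
-- into a pre-allocated zero list, instead of A's grow-by-append loop (objective: alternative).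

-- ===== PORT A =====
def labels_sequence (labels : List Int) (timestamps : List Int) : List Int :=
  if labels = [] then []
  else
    (PySem.List.pyRange 1 (timestamps.length : Int) 1).foldl
      (fun acc i =>
        acc ++ List.replicate (max (PySem.List.pyGetD timestamps i 0 - PySem.List.pyGetD timestamps (i - 1) 0 - 1) 0).toNat 0
            ++ [PySem.List.pyGetD labels i 0 + 1])
      [PySem.List.pyGetD labels 0 0 + 1]

-- ===== PORT B =====
def labels_sequence_alt (labels : List Int) (timestamps : List Int) : List Int :=
  if labels = [] then []
  else
    let st := (PySem.List.pyRange 1 (timestamps.length : Int) 1).foldl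
      (fun (st : Int × List (Int × Int)) i =>
        let off := st.1 + max (PySem.List.pyGetD timestamps i 0 - PySem.List.pyGetD timestamps (i - 1) 0 - 1) 0 + 1
        (off, st.2 ++ [(off, PySem.List.pyGetD labels i 0 + 1)]))
      ((0 : Int), [((0 : Int), PySem.List.pyGetD labels 0 0 + 1)])
    st.2.foldl (fun acc pv => acc.set pv.1.toNat pv.2) (List.replicate (st.1 + 1).toNat 0)

-- ===== PRECONDITION & SPEC =====
-- Pre_ excludes exactly the inputs where Python A raises IndexError: a nonempty
-- labels list shorter than timestamps (labels[i] is read for every i < len(timestamps)).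
def Pre_labels_sequence (labels : List Int) (timestamps : List Int) : Prop :=
  labels ≠ [] → timestamps.length ≤ labels.length
instance (labels : List Int) (timestamps : List Int) : Decidable (Pre_labels_sequence labels timestamps) := by unfold Pre_labels_sequence; infer_instance

def pvWitness_labels_sequence : List Int × List Int := ([1, 2], [0, 3])

def Spec_labels_sequence (labels : List Int) (timestamps : List Int) (out : List Int) : Prop := out = labels_sequence_alt labels timestamps
instance (labels : List Int) (timestamps : List Int) (out : List Int) : Decidable (Spec_labels_sequence labels timestamps out) := by unfold Spec_labels_sequence; infer_instance

-- ===== CLAIM (what is proved, stated in full; the proofs are below) =====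
def Claim_equal_labels_sequence : Prop := ∀ (labels : List Int) (timestamps : List Int), Dom_labels_sequence labels timestamps → Pre_labels_sequence labels timestamps → Spec_labels_sequence labels timestamps (labels_sequence labels timestamps)

-- ===== LEMMAS AND PROOFS =====

-- Setting index `l₁.length + k` in an append lands in the right part.
lemma set_append_right_add {α : Type} (l₁ l₂ : List α) (k : Nat) (v : α) :
    (l₁ ++ l₂).set (l₁.length + k) v = l₁ ++ l₂.set k v := by
  induction l₁ with
  | nil => simp
  | cons a t ih => simp [Nat.succ_add, ih]

-- Setting index k (< m) in a zero list splits it into zeros, the value, zeros.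
lemma set_replicate_zero (m k : Nat) (v : Int) (h : k < m) :
    (List.replicate m (0 : Int)).set k v
      = List.replicate k 0 ++ v :: List.replicate (m - k - 1) 0 := by
  induction k generalizing m with
  | zero =>
    cases m with
    | zero => omega
    | succ m' => simp [List.replicate_succ]
  | succ k ih =>
    cases m with
    | zero => omega
    | succ m' =>
      simp [List.replicate_succ, ih m' (by omega)]

-- Loop invariant relating A's append loop and B's (offset, pairs) pass:
-- the offset is one less than the length of A's list, and scattering the pairs
-- into any long-enough zero list reproduces A's list padded with zeros.
lemma scatter_inv (gap : Int → Int) (lab : Int → Int) (v0 : Int)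
    (hgap : ∀ i, 0 ≤ gap i) (idxs : List Int) :
    (idxs.foldl (fun (st : Int × List (Int × Int)) i =>
        let off := st.1 + gap i + 1
        (off, st.2 ++ [(off, lab i)])) ((0 : Int), [((0 : Int), v0)])).1 + 1
      = ((idxs.foldl (fun acc i => acc ++ List.replicate (gap i).toNat 0 ++ [lab i]) [v0]).length : Int)
    ∧ ∀ m : Nat,
      (idxs.foldl (fun acc i => acc ++ List.replicate (gap i).toNat 0 ++ [lab i]) [v0]).length ≤ m →
      (idxs.foldl (fun (st : Int × List (Int × Int)) i =>
          let off := st.1 + gap i + 1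
          (off, st.2 ++ [(off, lab i)])) ((0 : Int), [((0 : Int), v0)])).2.foldl
          (fun acc pv => acc.set pv.1.toNat pv.2) (List.replicate m 0)
        = (idxs.foldl (fun acc i => acc ++ List.replicate (gap i).toNat 0 ++ [lab i]) [v0])
          ++ List.replicate (m - (idxs.foldl (fun acc i => acc ++ List.replicate (gap i).toNat 0 ++ [lab i]) [v0]).length) 0 := by
  induction idxs using List.reverseRecOn with
  | nil =>
    refine ⟨by simp, ?_⟩
    intro m hm
    simp only [List.foldl] at *
    have h1 : 0 < m := by simpa using hm
    rw [show ((0:Int).toNat) = 0 from rfl, set_replicate_zero m 0 v0 h1]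
    simp
  | append_singleton idxs i ih =>
    obtain ⟨ih1, ih2⟩ := ih
    set L := idxs.foldl (fun acc i => acc ++ List.replicate (gap i).toNat 0 ++ [lab i]) [v0] with hL
    set st := idxs.foldl (fun (st : Int × List (Int × Int)) i =>
        let off := st.1 + gap i + 1
        (off, st.2 ++ [(off, lab i)])) ((0 : Int), [((0 : Int), v0)]) with hst
    have hg : ((gap i).toNat : Int) = gap i := Int.toNat_of_nonneg (hgap i)
    have hoff : st.1 = (L.length : Int) - 1 := by omega
    constructor
    · simp only [List.foldl_append, List.foldl]
      rw [← hL, ← hst]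
      simp only [List.length_append, List.length_replicate, List.length_cons,
        List.length_nil]
      push_cast
      omega
    · intro m hm
      simp only [List.foldl_append, List.foldl] at hm ⊢
      rw [← hL] at hm
      rw [← hL, ← hst]
      simp only [List.length_append, List.length_replicate, List.length_cons,
        List.length_nil] at hm
      -- new length is L.length + gapN + 1 ≤ m
      have hmL : L.length ≤ m := by omega
      rw [ih2 m hmL]
      have hidx : (st.1 + gap i + 1).toNat = L.length + (gap i).toNat := by omega
      rw [hidx, set_append_right_add L (List.replicate (m - L.length) 0) ((gap i).toNat) (lab i),
        set_replicate_zero (m - L.length) ((gap i).toNat) (lab i) (by omega)]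
      simp only [List.length_append, List.length_replicate, List.length_cons, List.length_nil]
      have : m - L.length - (gap i).toNat - 1 = m - (L.length + (gap i).toNat + 1) := by omega
      rw [this]
      simp

-- ===== VERDICT (by name: the statement is the Claim_ definition above) =====
theorem labels_sequence_spec : Claim_equal_labels_sequence := by
  intro labels timestamps _ _
  unfold Spec_labels_sequence labels_sequence labels_sequence_alt
  by_cases h : labels = []
  · simp [h]
  · simp only [if_neg h]
    obtain ⟨h1, h2⟩ := scatter_inv
      (fun i => max (PySem.List.pyGetD timestamps i 0 - PySem.List.pyGetD timestamps (i - 1) 0 - 1) 0)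
      (fun i => PySem.List.pyGetD labels i 0 + 1)
      (PySem.List.pyGetD labels 0 0 + 1)
      (fun i => le_max_right _ _)
      (PySem.List.pyRange 1 (timestamps.length : Int) 1)
    dsimp only at h1 h2
    rw [h2 _ (by omega)]
    rw [List.self_eq_append_right, List.replicate_eq_nil_iff]
    omega
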